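-- pv_equiv track=rewrite | github.com/opencodeiiita/Limen | submission/23abdul23/Feature Addition: NumberMyImage/iit2024243.py | binary_to_int
-- ===== SOURCE A (Python) =====
-- def binary_to_int(binary):
--     #converting binary to integer
--     integer, i = 0, 0
--     while(binary != 0):
--         dec = binary % 10
--         integer = integer + dec * pow(2, i)
--         binary = binary//10
--         i += 1
--     return (integer)
-- ===== SOURCE B (Python) =====
-- def binary_to_int(binary):
--     # Horner's method over the decimal string, most-significant digit first.
--     integer = 0
--     for ch in str(binary):
--         integer = integer * 2 + int(ch)
--     return integer
-- ===== Notes on version B (the rewrite author's own statement) =====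
-- stated objective: idiomatic
-- what changed: Replaces the LSB-first %10-and-pow(2,i) accumulation loop with an MSB-first Horner fold over str(binary), removing the explicit exponentiation and the mutation of the argument copy.
import Mathlib
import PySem

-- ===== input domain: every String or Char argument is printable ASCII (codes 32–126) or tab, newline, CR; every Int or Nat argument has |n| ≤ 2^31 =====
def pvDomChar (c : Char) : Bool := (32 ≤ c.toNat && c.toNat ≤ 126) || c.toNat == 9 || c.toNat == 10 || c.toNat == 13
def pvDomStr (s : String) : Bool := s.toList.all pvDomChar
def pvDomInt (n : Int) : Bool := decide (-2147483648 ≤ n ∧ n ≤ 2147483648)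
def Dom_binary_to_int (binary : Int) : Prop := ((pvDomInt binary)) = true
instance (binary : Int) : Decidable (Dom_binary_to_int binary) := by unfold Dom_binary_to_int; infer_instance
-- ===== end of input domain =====

-- B replaces A's LSB-first %10/pow(2,i) loop by an MSB-first Horner fold over str(binary) (idiomatic decomposition, same cost class).
-- Pre_ excludes negative inputs: there A's `binary //= 10` never reaches 0, so the Python loop diverges.


-- ===== PORT A =====
-- A's while-loop; on Pre_ (0 ≤ binary) Python's `% 10` / `// 10` coincide with Nat `% 10` / `/ 10`,
-- and the loop guard `binary != 0` is `b ≠ 0`.  (Python diverges on negative binary — outside Pre_.)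
def binary_to_int_loop (b : Nat) (integer : Int) (i : Nat) : Int :=
  if b = 0 then integer
  else binary_to_int_loop (b / 10) (integer + (b % 10 : Int) * 2 ^ i) (i + 1)
decreasing_by exact Nat.div_lt_self (Nat.pos_of_ne_zero (by assumption)) (by omega)

def binary_to_int (binary : Int) : Int := binary_to_int_loop binary.toNat 0 0

-- ===== PORT B =====
-- Horner fold over str(binary); int(ch) ported as ch.toNat - 48, exact for the digit
-- characters str(binary) produces on Pre_ (0 ≤ binary).
def binary_to_int_alt (binary : Int) : Int :=
  (PySem.Int.toChars binary).foldl (fun integer ch => integer * 2 + ((ch.toNat : Int) - 48)) 0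

-- ===== PRECONDITION & SPEC =====
-- Pre_ excludes negative inputs, on which the Python A never terminates (binary//10 stalls at -1).
def Pre_binary_to_int (binary : Int) : Prop := 0 ≤ binary
instance (binary : Int) : Decidable (Pre_binary_to_int binary) := by unfold Pre_binary_to_int; infer_instance
def pvWitness_binary_to_int : Int := (1101)

def Spec_binary_to_int (binary : Int) (out : Int) : Prop := out = binary_to_int_alt binary
instance (binary : Int) (out : Int) : Decidable (Spec_binary_to_int binary out) := by unfold Spec_binary_to_int; infer_instance

-- ===== CLAIM (what is proved, stated in full; the proofs are below) =====
def Claim_equal_binary_to_int : Prop := ∀ (binary : Int), Dom_binary_to_int binary → Pre_binary_to_int binary → Spec_binary_to_int binary (binary_to_int binary)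

-- ===== LEMMAS AND PROOFS =====

/-- Value of the decimal numeral `n` read as a binary numeral (LSB-first weighting). -/
def pvV (n : Nat) : Int :=
  if n = 0 then 0 else (n % 10 : Int) + 2 * pvV (n / 10)
decreasing_by exact Nat.div_lt_self (Nat.pos_of_ne_zero (by assumption)) (by omega)

theorem loop_eq_pvV (b : Nat) : ∀ (integer : Int) (i : Nat),
    binary_to_int_loop b integer i = integer + 2 ^ i * pvV b := by
  induction b using Nat.strong_induction_on with
  | _ b ih =>
    intro integer i
    rw [binary_to_int_loop, pvV]
    by_cases hb : b = 0
    · simp [hb]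
    · rw [if_neg hb, if_neg hb,
        ih (b / 10) (Nat.div_lt_self (Nat.pos_of_ne_zero hb) (by omega))]
      ring

/-- Horner accumulation of the decimal digits of `n` (MSB-first), starting from `a`. -/
def pvA (a : Int) (n : Nat) : Int :=
  if n < 10 then 2 * a + (n % 10 : Int) else 2 * pvA a (n / 10) + (n % 10 : Int)
decreasing_by exact Nat.div_lt_self (by omega) (by omega)

theorem pvA_zero (n : Nat) : pvA 0 n = pvV n := by
  induction n using Nat.strong_induction_on with
  | _ n ih =>
    rw [pvA, pvV]
    by_cases h : n < 10
    · by_cases h0 : n = 0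
      · simp [h0]
      · rw [if_pos h, if_neg h0]
        have : n / 10 = 0 := Nat.div_eq_of_lt h
        rw [this, pvV]
        simp
    · rw [if_neg h, if_neg (by omega),
        ih (n / 10) (Nat.div_lt_self (by omega) (by omega)),
        mul_comm (2 : Int)]
      omega

theorem digitChar_val (d : Nat) (hd : d < 10) :
    ((Nat.digitChar d).toNat : Int) - 48 = (d : Int) := by
  interval_cases d <;> decide

theorem foldl_toDigitsCore (f : Nat) : ∀ (n : Nat) (acc : List Char) (a : Int),
    n < 10 ^ (f + 1) →
    (Nat.toDigitsCore 10 (f + 1) n acc).foldl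
        (fun integer ch => integer * 2 + ((ch.toNat : Int) - 48)) a
      = acc.foldl (fun integer ch => integer * 2 + ((ch.toNat : Int) - 48)) (pvA a n) := by
  induction f with
  | zero =>
    intro n acc a hn
    have h10 : n / 10 = 0 := Nat.div_eq_of_lt (by omega)
    rw [Nat.toDigitsCore, if_pos h10, List.foldl_cons,
      digitChar_val _ (Nat.mod_lt _ (by omega)), pvA, if_pos (by omega)]
    have : (a * 2 + ((n % 10 : Nat) : Int)) = 2 * a + ((n : Int) % 10) := by push_cast; ring
    rw [this]
  | succ f ih =>
    intro n acc a hn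
    rw [Nat.toDigitsCore]
    by_cases h10 : n / 10 = 0
    · rw [if_pos h10, List.foldl_cons,
        digitChar_val _ (Nat.mod_lt _ (by omega)), pvA, if_pos (by omega)]
      have : (a * 2 + ((n % 10 : Nat) : Int)) = 2 * a + ((n : Int) % 10) := by push_cast; ring
      rw [this]
    · rw [if_neg h10,
        ih (n / 10) _ a (by
          rw [Nat.div_lt_iff_lt_mul (by omega)]
          calc n < 10 ^ (f + 1 + 1) := hn
            _ = 10 ^ (f + 1) * 10 := by ring),
        List.foldl_cons, digitChar_val _ (Nat.mod_lt _ (by omega))]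
      have hpa : pvA a n = pvA a (n / 10) * 2 + ((n % 10 : Nat) : Int) := by
        conv_lhs => rw [pvA]
        rw [if_neg (by omega)]
        push_cast
        ring
      rw [← hpa]

theorem alt_eq_pvV (binary : Int) (h : 0 ≤ binary) :
    binary_to_int_alt binary = pvV binary.toNat := by
  rw [binary_to_int_alt, PySem.Int.toChars, if_neg (by omega), Nat.toDigits]
  rw [foldl_toDigitsCore binary.toNat binary.toNat [] 0
      (lt_of_lt_of_le (Nat.lt_two_pow_self)
        (Nat.pow_le_pow_left (by omega) _ |>.trans (Nat.pow_le_pow_right (by omega) (by omega))))]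
  simp [pvA_zero]

-- ===== VERDICT (by name: the statement is the Claim_ definition above) =====
theorem binary_to_int_spec : Claim_equal_binary_to_int := by
  intro binary _ hpre
  unfold Spec_binary_to_int binary_to_int
  rw [loop_eq_pvV, alt_eq_pvV binary hpre]
  simp
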